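-- pv_equiv track=rewrite | github.com/KulyashDahiya/PythonDSA | FreeCodingNinjas/NumberPattern2.py | patt
-- ===== SOURCE A (Python) =====
-- def patt(n):
--     res =[]
--     for i in range(n):
--         s = ""
--         for j in range(n-i):
--             s = s + str(j+1)
--         res.append(s)
--     return res
-- ===== SOURCE B (Python) =====
-- def patt(n):
--     res = []
--     s = ""
--     for L in range(1, n + 1):
--         s = s + str(L)
--         res.append(s)
--     res.reverse()
--     return res
-- ===== Notes on version B (the rewrite author's own statement) =====
-- stated objective: faster
-- what changed: Each row is obtained by extending the previous row with one more number in a single accumulating pass (then reversing), instead of rebuilding every row from scratch with a nested inner loop.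
import Mathlib
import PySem

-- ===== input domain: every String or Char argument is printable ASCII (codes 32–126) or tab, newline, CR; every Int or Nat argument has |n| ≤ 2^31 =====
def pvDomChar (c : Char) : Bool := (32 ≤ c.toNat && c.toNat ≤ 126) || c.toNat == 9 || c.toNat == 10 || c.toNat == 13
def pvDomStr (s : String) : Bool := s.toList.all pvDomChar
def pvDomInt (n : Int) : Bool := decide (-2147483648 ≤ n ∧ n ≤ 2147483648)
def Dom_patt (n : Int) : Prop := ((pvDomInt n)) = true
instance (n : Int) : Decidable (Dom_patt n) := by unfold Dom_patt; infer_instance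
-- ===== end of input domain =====

-- B builds each row by extending the previous one in a single accumulating pass, then reverses;
-- A rebuilds every row from scratch with a nested inner loop.

-- ===== PORT A =====
def patt (n : Int) : List String :=
  (PySem.List.pyRange 0 n 1).foldl
    (fun res i =>
      res ++ [(PySem.List.pyRange 0 (n - i) 1).foldl
                (fun s j => s ++ PySem.Int.toStr (j + 1)) ""])
    []

-- ===== PORT B =====
def patt_alt (n : Int) : List String :=
  let p := (PySem.List.pyRange 1 (n + 1) 1).foldl
    (fun (p : List String × String) L =>
      let s := p.2 ++ PySem.Int.toStr L
      (p.1 ++ [s], s))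
    ([], "")
  p.1.reverse

-- ===== PRECONDITION & SPEC =====
def Spec_patt (n : Int) (out : List String) : Prop := out = patt_alt n
instance (n : Int) (out : List String) : Decidable (Spec_patt n out) := by unfold Spec_patt; infer_instance

-- ===== CLAIM (what is proved, stated in full; the proofs are below) =====
def Claim_equal_patt : Prop := ∀ (n : Int), Dom_patt n → Spec_patt n (patt n)

-- ===== LEMMAS AND PROOFS =====

/-- "1 2 … m" as one digit string: the inner loop of A (and B's accumulator after m steps). -/
def rowI (m : Int) : String :=
  (PySem.List.pyRange 0 m 1).foldl (fun s j => s ++ PySem.Int.toStr (j + 1)) ""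

theorem rowI_succ (m : Int) (h : 0 ≤ m) :
    rowI (m + 1) = rowI m ++ PySem.Int.toStr (m + 1) := by
  unfold rowI
  rw [PySem.List.pyRange_one_succ_right h, List.foldl_append]
  simp

theorem patt_eq_map (n : Int) :
    patt n = (List.range n.toNat).map (fun (k : Nat) => rowI (n - (k : Int))) := by
  unfold patt
  rw [PySem.List.foldl_append_singleton_eq_map, PySem.List.pyRange_one, List.map_map,
    List.nil_append]
  simp only [sub_zero]
  refine List.map_congr_left (fun k _ => ?_)
  simp [rowI]

theorem patt_alt_fold (m : Nat) :
    (PySem.List.pyRange 1 ((m : Int) + 1) 1).foldl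
      (fun (p : List String × String) L =>
        let s := p.2 ++ PySem.Int.toStr L
        (p.1 ++ [s], s))
      ([], "")
      = ((List.range m).map (fun (k : Nat) => rowI ((k : Int) + 1)), rowI (m : Int)) := by
  induction m with
  | zero =>
      rw [PySem.List.pyRange_one_eq_nil (by norm_num)]
      simp [rowI, PySem.List.pyRange_one_eq_nil]
  | succ m ih =>
      have h1 : (1 : Int) ≤ (m : Int) + 1 := by omega
      have hc : ((m + 1 : Nat) : Int) + 1 = ((m : Int) + 1) + 1 := by push_cast; ring
      rw [hc, PySem.List.pyRange_one_succ_right h1, List.foldl_append, ih]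
      simp only [List.foldl_cons, List.foldl_nil]
      rw [← rowI_succ (m : Int) (by omega)]
      rw [List.range_succ]
      simp

theorem map_sub_eq_reverse (m : Nat) :
    (List.range m).map (fun (k : Nat) => rowI ((m : Int) - (k : Int)))
      = ((List.range m).map (fun (k : Nat) => rowI ((k : Int) + 1))).reverse := by
  apply List.ext_getElem
  · simp
  · intro i h1 h2
    simp only [List.length_map, List.length_range] at h1
    simp only [List.getElem_map, List.getElem_range, List.getElem_reverse,
      List.length_map, List.length_range]
    congr 1
    omega

-- ===== VERDICT (by name: the statement is the Claim_ definition above) =====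
theorem patt_spec : Claim_equal_patt := by
  intro n _
  unfold Spec_patt
  by_cases h : n ≤ 0
  · have h0 : n.toNat = 0 := Int.toNat_of_nonpos h
    rw [patt_eq_map, h0]
    unfold patt_alt
    rw [PySem.List.pyRange_one_eq_nil (by omega)]
    simp
  · have hn : ((n.toNat : Int)) = n := Int.toNat_of_nonneg (by omega)
    rw [patt_eq_map]
    unfold patt_alt
    rw [show n + 1 = ((n.toNat : Int)) + 1 by omega, patt_alt_fold]
    have hm := map_sub_eq_reverse n.toNat
    rw [hn] at hm
    exact hm
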